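-- pv_equiv track=rewrite | github.com/regismeyssonnier/Polyomino | polio_cg.py | rotationsK2
-- ===== SOURCE A (Python) =====
-- def rotationsK2(shape):
--     """
--     Retourne les 8 transformations (4 rotations × miroir horizontal)
--     d’un polyomino représenté par une liste de coordonnées [(y,x), ...].
--     """
--     def rotate90(coords):
--         # rotation 90°: (y, x) → (x, -y)
--         return [(x, -y) for (y, x) in coords]
--
--     def mirror(coords):
--         # miroir horizontal: (y, x) → (y, -x)
--         return [(y, -x) for (y, x) in coords]
--
--     def normalize(coords):
--         # recentre pour éviter les décalages : (0,0) en haut-gauche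
--         miny = min(y for y, _ in coords)
--         minx = min(x for _, x in coords)
--         return sorted([(y - miny, x - minx) for y, x in coords])
--
--     rots = []
--
--     current = shape
--     for _ in range(4):  # 0°, 90°, 180°, 270°
--         rots.append((current))
--         current = rotate90(current)
--
--     mirrored = mirror(shape)
--     current = mirrored
--     for _ in range(4):
--         rots.append((current))
--         current = rotate90(current)
--
--     # on retire les doublons (certaines formes symétriques ont < 8 variantes)
--     unique_rots = []
--     seen = set()
--     for r in rots:
--         t = tuple(r)
--         if t not in seen:
--             seen.add(t)
--             unique_rots.append(r)
--
--     return unique_rots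
-- ===== SOURCE B (Python) =====
-- def rotationsK2(shape):
--     # The 8 elements of D4, applied directly to the original shape, in exactly
--     # the order A emits them: 4 rotations of shape, then 4 rotations of its mirror.
--     transforms = [
--         lambda y, x: (y, x),
--         lambda y, x: (x, -y),
--         lambda y, x: (-y, -x),
--         lambda y, x: (-x, y),
--         lambda y, x: (y, -x),
--         lambda y, x: (-x, -y),
--         lambda y, x: (-y, x),
--         lambda y, x: (x, y),
--     ]
--     unique_rots = []
--     seen = set()
--     for f in transforms:
--         r = [f(y, x) for (y, x) in shape]
--         t = tuple(r)
--         if t not in seen: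
--             seen.add(t)
--             unique_rots.append(r)
--     return unique_rots
-- ===== Notes on version B (the rewrite author's own statement) =====
-- stated objective: simpler
-- what changed: B replaces A's two iterated rotate90 chains (each variant computed from the previous one) by a fixed table of the 8 closed-form D4 coordinate maps applied independently to the original shape, keeping the same emission order and seen-set dedup.
import Mathlib
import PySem

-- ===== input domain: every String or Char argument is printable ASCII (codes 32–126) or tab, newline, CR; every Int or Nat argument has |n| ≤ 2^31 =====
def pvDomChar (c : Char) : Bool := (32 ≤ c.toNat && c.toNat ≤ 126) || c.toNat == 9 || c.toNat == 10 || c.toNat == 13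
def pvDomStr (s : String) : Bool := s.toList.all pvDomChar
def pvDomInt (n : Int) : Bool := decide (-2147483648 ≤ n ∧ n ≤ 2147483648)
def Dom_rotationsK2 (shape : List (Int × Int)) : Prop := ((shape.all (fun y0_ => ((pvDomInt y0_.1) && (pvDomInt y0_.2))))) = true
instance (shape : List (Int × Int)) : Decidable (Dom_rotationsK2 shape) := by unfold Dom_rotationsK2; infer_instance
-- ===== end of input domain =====

-- B: fixed table of the 8 closed-form D4 maps applied to the original shape, instead of A's iterated rotate90 chains; same order and dedup (objective: simpler).
-- ===== PORT A =====
def pvRotate90 (coords : List (Int × Int)) : List (Int × Int) :=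
  coords.map (fun p => (p.2, -p.1))

def pvMirror (coords : List (Int × Int)) : List (Int × Int) :=
  coords.map (fun p => (p.1, -p.2))

-- the dedup loop at the end of A: seen-set of tuples, keep first occurrences
def pvDedupA (rots : List (List (Int × Int))) : List (List (Int × Int)) :=
  (rots.foldl
    (fun (st : List (List (Int × Int)) × PySem.Set (List (Int × Int))) r =>
      if PySem.Set.contains st.2 r then st
      else (st.1 ++ [r], PySem.Set.add st.2 r))
    ([], PySem.Set.empty)).1

def rotationsK2 (shape : List (Int × Int)) : List (List (Int × Int)) :=
  let st1 := (List.range 4).foldl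
    (fun (st : List (List (Int × Int)) × List (Int × Int)) _ =>
      (st.1 ++ [st.2], pvRotate90 st.2)) ([], shape)
  let mirrored := pvMirror shape
  let st2 := (List.range 4).foldl
    (fun (st : List (List (Int × Int)) × List (Int × Int)) _ =>
      (st.1 ++ [st.2], pvRotate90 st.2)) (st1.1, mirrored)
  pvDedupA st2.1

-- ===== PORT B =====
def pvTransformsB : List ((Int × Int) → (Int × Int)) :=
  [fun p => (p.1, p.2), fun p => (p.2, -p.1), fun p => (-p.1, -p.2), fun p => (-p.2, p.1),
   fun p => (p.1, -p.2), fun p => (-p.2, -p.1), fun p => (-p.1, p.2), fun p => (p.2, p.1)]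

-- B's dedup loop (same Python code as A's final loop)
def pvDedupB (rots : List (List (Int × Int))) : List (List (Int × Int)) :=
  (rots.foldl
    (fun (st : List (List (Int × Int)) × PySem.Set (List (Int × Int))) r =>
      if PySem.Set.contains st.2 r then st
      else (st.1 ++ [r], PySem.Set.add st.2 r))
    ([], PySem.Set.empty)).1

def rotationsK2_alt (shape : List (Int × Int)) : List (List (Int × Int)) :=
  pvDedupB (pvTransformsB.map (fun f => shape.map f))

-- ===== PRECONDITION & SPEC =====
def Spec_rotationsK2 (shape : List (Int × Int)) (out : List (List (Int × Int))) : Prop := out = rotationsK2_alt shape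
instance (shape : List (Int × Int)) (out : List (List (Int × Int))) : Decidable (Spec_rotationsK2 shape out) := by unfold Spec_rotationsK2; infer_instance

-- ===== CLAIM (what is proved, stated in full; the proofs are below) =====
def Claim_equal_rotationsK2 : Prop := ∀ (shape : List (Int × Int)), Dom_rotationsK2 shape → Spec_rotationsK2 shape (rotationsK2 shape)

-- ===== LEMMAS AND PROOFS =====

-- ===== VERDICT (by name: the statement is the Claim_ definition above) =====
-- Both sides reduce to the same dedup of the same literal 8-list of mapped shapes.
theorem pvRots_eq (shape : List (Int × Int)) :
    rotationsK2 shape = rotationsK2_alt shape := by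
  unfold rotationsK2 rotationsK2_alt pvTransformsB
  simp only [List.range_succ, List.range_zero, List.nil_append, List.foldl_append,
    List.foldl_cons, List.foldl_nil, List.map_cons, List.map_nil]
  have e : pvDedupA = pvDedupB := rfl
  rw [e]
  congr 1
  simp only [pvRotate90, pvMirror, List.map_map, List.cons_append, List.nil_append]
  rw [show (fun (p : Int × Int) => (p.1, p.2)) = id from rfl, List.map_id]
  simp [Function.comp_def]

theorem rotationsK2_spec : Claim_equal_rotationsK2 := by
  intro shape _
  unfold Spec_rotationsK2
  exact pvRots_eq shape
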